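-- pv_equiv track=rewrite | github.com/encgoo/hackerrank | DynamicProgramming/the_indian_job.py | indianJob
-- ===== SOURCE A (Python) =====
-- def indianJob(g, arr):
--     total_time_needed = sum(arr)
--     if total_time_needed > 2*g:
--         return "NO"
--     if max(arr) > g:
--         return "NO"
--
--     #
--     # max_holding[i][j] store the information stores the following infomration
--     # when g = i, given arr[0]...arr[j], the maximum to be done within g = i
--     #
--     max_holding = [[0]* (g + 1) for i in range(len(arr) + 1)]
--
--     # initialize
--     for i in range(1, len(arr) + 1):
--         for g_i in range(1, g + 1):
--             if g_i < arr[i - 1]: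
--                 # There is no way to put the new arr[i - 1] into g_i
--                 # Same as without arr[i], or say i - 1 case
--                 max_holding[i][g_i] = max_holding[i - 1][g_i]
--             else:
--                 # it is possible to put arr[i - 1] into g_i
--                 # two possiblities, take the max one
--                 max_holding[i][g_i] = max(max_holding[i - 1][g_i],
--                 max_holding[i - 1][g_i - arr[i - 1]] + arr[i - 1])
--
--     if total_time_needed - max_holding[len(arr)][g] <= g:
--         return "YES"
--     else:
--         return "NO"
-- ===== SOURCE B (Python) =====
-- def indianJob(g, arr):
--     total = sum(arr)
--     if total > 2 * g:
--         return "NO"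
--     if total <= g:
--         return "YES"
--     if max(arr) > g:
--         return "NO"
--     # reachable subset sums not exceeding g
--     reach = {0}
--     for a in arr:
--         reach |= {s + a for s in reach if s + a <= g}
--     return "YES" if total - max(reach) <= g else "NO"
-- ===== Notes on version B (the rewrite author's own statement) =====
-- stated objective: alternative
-- what changed: B replaces A's O(n*g) max-knapsack DP table by an incrementally built set of reachable subset sums pruned at g (plus early total<=g / max>g exits), answering from total - max(reachable).
-- outside the precondition, e.g. on indianJob(5, [-6, 7, 0, 0, -1, -8, -4]): A returns 'NO', B returns 'YES'; on indianJob(0, [-1]): A returns 'YES', B returns 'YES'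
import Mathlib
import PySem

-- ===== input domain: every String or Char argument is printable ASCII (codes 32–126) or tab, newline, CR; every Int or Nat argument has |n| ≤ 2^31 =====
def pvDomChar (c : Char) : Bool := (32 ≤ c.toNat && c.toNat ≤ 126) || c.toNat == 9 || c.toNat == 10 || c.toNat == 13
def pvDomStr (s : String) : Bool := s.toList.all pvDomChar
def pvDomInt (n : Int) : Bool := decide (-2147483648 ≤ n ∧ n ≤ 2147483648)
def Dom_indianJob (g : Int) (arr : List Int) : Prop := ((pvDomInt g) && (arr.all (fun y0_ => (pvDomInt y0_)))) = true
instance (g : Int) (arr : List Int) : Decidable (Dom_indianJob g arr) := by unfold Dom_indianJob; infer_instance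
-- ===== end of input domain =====

-- B replaces A's max-knapsack table by a reachable-subset-sum set pruned at g, with early total/max exits (objective: alternative).

-- ===== PORT A =====
-- table read max_holding[i][j]; the default 0 is never used where Python executes (out of range = IndexError, outside Pre_)
def pvGet2 (t : List (List Int)) (i j : Int) : Int :=
  ((PySem.List.pyGet? t i).bind (fun r => PySem.List.pyGet? r j)).getD 0

-- table write max_holding[i][j] = v; wherever Python executes this, 0 ≤ i,j and both are in range (else IndexError, outside Pre_)
def pvSet2 (t : List (List Int)) (i j : Int) (v : Int) : List (List Int) :=
  t.set i.toNat ((t.getD i.toNat []).set j.toNat v)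

-- the inner 'for g_i in range(1, g + 1)' loop, as a helper
def pvInner (g : Int) (arr : List Int) (i : Int) (t : List (List Int)) : List (List Int) :=
  (PySem.List.pyRange 1 (g + 1) 1).foldl (fun t gi =>
    if gi < (PySem.List.pyGet? arr (i - 1)).getD 0 then
      pvSet2 t i gi (pvGet2 t (i - 1) gi)
    else
      pvSet2 t i gi (max (pvGet2 t (i - 1) gi)
        (pvGet2 t (i - 1) (gi - (PySem.List.pyGet? arr (i - 1)).getD 0)
          + (PySem.List.pyGet? arr (i - 1)).getD 0))) t

def indianJob (g : Int) (arr : List Int) : String :=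
  let total := arr.sum
  if total > 2 * g then "NO"
  -- max(arr): Python raises ValueError on []; the .getD 0 is unreachable under Pre_
  else if (PySem.List.max? arr (fun x => x)).getD 0 > g then "NO"
  else
    let table : List (List Int) :=
      (PySem.List.pyRange 0 ((arr.length : Int) + 1) 1).map (fun _ => List.replicate (g + 1).toNat 0)
    let table :=
      (PySem.List.pyRange 1 ((arr.length : Int) + 1) 1).foldl (fun t i => pvInner g arr i t) table
    if total - pvGet2 table (arr.length : Int) g ≤ g then "YES" else "NO"

-- ===== PORT B =====
def indianJob_alt (g : Int) (arr : List Int) : String :=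
  let total := arr.sum
  if total > 2 * g then "NO"
  else if total ≤ g then "YES"
  -- max(arr): unreachable on [] here (total = 0 then hits one of the two guards above)
  else if (PySem.List.max? arr (fun x => x)).getD 0 > g then "NO"
  else
    let reach : PySem.Set Int := arr.foldl (fun r a =>
      PySem.Set.union r ((r.filter (fun s => decide (s + a ≤ g))).map (fun s => s + a)))
      (PySem.Set.ofList [0])
    -- max(reach): reach always contains 0, so the .getD 0 is unreachable
    if total - (PySem.List.max? reach (fun x => x)).getD 0 ≤ g then "YES" else "NO"

-- ===== PRECONDITION & SPEC =====
-- Pre_ excludes ([], g ≥ 0), where max(arr) raises ValueError, and inputs with a negative entry that get past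
-- the sum > 2*g guard: on those A's DP either raises IndexError or returns a guard value outside the problem's
-- natural domain (nonnegative job times).
def Pre_indianJob (g : Int) (arr : List Int) : Prop :=
  (arr ≠ [] ∨ g < 0) ∧ ((∀ a ∈ arr, 0 ≤ a) ∨ arr.sum > 2 * g)
instance (g : Int) (arr : List Int) : Decidable (Pre_indianJob g arr) := by unfold Pre_indianJob; infer_instance

def pvWitness_indianJob : Int × List Int := (4, [1, 2, 3])

def Spec_indianJob (g : Int) (arr : List Int) (out : String) : Prop := out = indianJob_alt g arr
instance (g : Int) (arr : List Int) (out : String) : Decidable (Spec_indianJob g arr out) := by unfold Spec_indianJob; infer_instance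

-- ===== CLAIM (what is proved, stated in full; the proofs are below) =====
def Claim_equal_indianJob : Prop := ∀ (g : Int) (arr : List Int), Dom_indianJob g arr → Pre_indianJob g arr → Spec_indianJob g arr (indianJob g arr)
-- ===== LEMMAS AND PROOFS =====




def pvRowF (f : Int → Int) (z : List Int) (k : Nat) : List Int :=
  (PySem.List.pyRange 1 ((k : Int) + 1) 1).foldl (fun row gi => row.set gi.toNat (f gi)) z

theorem pvRowF_succ (f : Int → Int) (z : List Int) (k : Nat) :
    pvRowF f z (k + 1) = (pvRowF f z k).set (k + 1) (f ((k : Int) + 1)) := by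
  unfold pvRowF
  rw [show ((k + 1 : Nat) : Int) + 1 = ((k : Int) + 1) + 1 by push_cast; ring,
    PySem.List.pyRange_one_succ_right (by omega), List.foldl_append]
  simp

theorem pvRowF_zero (f : Int → Int) (z : List Int) : pvRowF f z 0 = z := by
  simp [pvRowF]

theorem pvRowF_length (f : Int → Int) (z : List Int) (k : Nat) :
    (pvRowF f z k).length = z.length := by
  induction k with
  | zero => rw [pvRowF_zero]
  | succ k ih => rw [pvRowF_succ, List.length_set, ih]

theorem pvRowF_getElem? (f : Int → Int) (z : List Int) (k j : Nat) :
    (pvRowF f z k)[j]? = if 1 ≤ j ∧ j ≤ k ∧ j < z.length then some (f (j : Int)) else z[j]? := by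
  induction k with
  | zero => rw [pvRowF_zero]; simp; omega
  | succ k ih =>
    rw [pvRowF_succ]
    by_cases hj : j = k + 1
    · subst hj
      by_cases hlen : k + 1 < z.length
      · rw [List.getElem?_set_self (by rw [pvRowF_length]; omega)]
        simp [hlen]
      · rw [List.getElem?_eq_none (by rw [List.length_set, pvRowF_length]; omega)]
        rw [if_neg (by omega), List.getElem?_eq_none (by omega)]
    · rw [List.getElem?_set_ne (by omega), ih]
      by_cases h1 : 1 ≤ j ∧ j ≤ k ∧ j < z.length
      · rw [if_pos h1, if_pos (by omega)]
      · rw [if_neg h1, if_neg (by omega)]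

theorem pvGet2_set_sub_one (t : List (List Int)) (i : Nat) (hi : 1 ≤ i) (r : List Int) (j : Int) :
    pvGet2 (t.set i r) ((i : Int) - 1) j = pvGet2 t ((i : Int) - 1) j := by
  have h : ((i : Int) - 1) = ((i - 1 : Nat) : Int) := by omega
  rw [pvGet2, pvGet2, h, PySem.List.pyGet?_natCast, PySem.List.pyGet?_natCast,
    List.getElem?_set_ne (by omega)]

theorem pvSet2_set (t : List (List Int)) (i : Nat) (hlen : i < t.length) (r : List Int)
    (j : Int) (v : Int) :
    pvSet2 (t.set i r) (i : Int) j v = t.set i (r.set j.toNat v) := by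
  rw [pvSet2, Int.toNat_natCast, List.getD_eq_getElem _ _ (by simpa using hlen),
    List.getElem_set_self (by simpa using hlen), List.set_set]

theorem pv_inner_partial (arr : List Int) (t : List (List Int)) (i : Nat)
    (hi : 1 ≤ i) (hlen : i < t.length) (k : Nat) :
    (PySem.List.pyRange 1 ((k : Int) + 1) 1).foldl (fun t gi =>
      if gi < (PySem.List.pyGet? arr ((i : Int) - 1)).getD 0 then
        pvSet2 t (i : Int) gi (pvGet2 t ((i : Int) - 1) gi)
      else
        pvSet2 t (i : Int) gi (max (pvGet2 t ((i : Int) - 1) gi)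
          (pvGet2 t ((i : Int) - 1) (gi - (PySem.List.pyGet? arr ((i : Int) - 1)).getD 0)
            + (PySem.List.pyGet? arr ((i : Int) - 1)).getD 0))) t
      = t.set i (pvRowF (fun gi =>
          if gi < (PySem.List.pyGet? arr ((i : Int) - 1)).getD 0 then
            pvGet2 t ((i : Int) - 1) gi
          else
            max (pvGet2 t ((i : Int) - 1) gi)
              (pvGet2 t ((i : Int) - 1) (gi - (PySem.List.pyGet? arr ((i : Int) - 1)).getD 0)
                + (PySem.List.pyGet? arr ((i : Int) - 1)).getD 0))
        (t.getD i []) k) := by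
  induction k with
  | zero =>
    rw [pvRowF_zero, List.getD_eq_getElem _ _ (by simpa using hlen), List.set_getElem_self hlen]
    simp
  | succ k ih =>
    rw [show ((k + 1 : Nat) : Int) + 1 = ((k : Int) + 1) + 1 by push_cast; ring,
      PySem.List.pyRange_one_succ_right (by omega), List.foldl_append, ih, pvRowF_succ]
    simp only [List.foldl_cons, List.foldl_nil]
    rw [pvGet2_set_sub_one t i hi, pvGet2_set_sub_one t i hi]
    split_ifs with hc
    all_goals rw [pvSet2_set t i hlen _ _, show ((k : Int) + 1).toNat = k + 1 by omega]

-- the inner loop updates exactly row i, as pvRowF of a function of the untouched row i-1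
theorem pv_inner_eq (g : Int) (arr : List Int) (hg : 0 ≤ g) (t : List (List Int)) (i : Nat)
    (hi : 1 ≤ i) (hlen : i < t.length) :
    pvInner g arr (i : Int) t
      = t.set i (pvRowF (fun gi =>
          if gi < (PySem.List.pyGet? arr ((i : Int) - 1)).getD 0 then
            pvGet2 t ((i : Int) - 1) gi
          else
            max (pvGet2 t ((i : Int) - 1) gi)
              (pvGet2 t ((i : Int) - 1) (gi - (PySem.List.pyGet? arr ((i : Int) - 1)).getD 0)
                + (PySem.List.pyGet? arr ((i : Int) - 1)).getD 0))
        (t.getD i []) g.toNat) := by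
  have hgr : g + 1 = ((g.toNat : Int)) + 1 := by omega
  rw [pvInner, hgr]
  exact pv_inner_partial arr t i hi hlen g.toNat

def pvBest : List Int → Int → Int
  | [], _ => 0
  | a :: l, j => if j < a then pvBest l j else max (pvBest l j) (pvBest l (j - a) + a)

theorem pvBest_zero (l : List Int) (hl : ∀ a ∈ l, 0 ≤ a) : pvBest l 0 = 0 := by
  induction l with
  | nil => rfl
  | cons a l ih =>
    have ha : 0 ≤ a := hl a (by simp)
    have ih' := ih (fun b hb => hl b (by simp [hb]))
    by_cases h : (0:Int) < a
    · simp [pvBest, h, ih']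
    · have ha0 : a = 0 := by omega
      subst ha0
      simp [pvBest, ih']


theorem pvBest_achieved (l : List Int) (j : Int) (hl : ∀ a ∈ l, 0 ≤ a) (hj : 0 ≤ j) :
    (∃ t : List Int, t.Sublist l ∧ t.sum = pvBest l j) ∧ pvBest l j ≤ j := by
  induction l generalizing j with
  | nil => exact ⟨⟨[], List.Sublist.refl _, rfl⟩, by simpa [pvBest] using hj⟩
  | cons a l ih =>
    have ha : 0 ≤ a := hl a (by simp)
    have hl' : ∀ b ∈ l, 0 ≤ b := fun b hb => hl b (by simp [hb])
    simp only [pvBest]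
    split_ifs with hja
    · obtain ⟨⟨t, hts, htsum⟩, hle⟩ := ih j hl' hj
      exact ⟨⟨t, hts.cons _, htsum⟩, hle⟩
    · have hja' : a ≤ j := not_lt.mp hja
      obtain ⟨⟨t1, ht1s, ht1sum⟩, hle1⟩ := ih j hl' hj
      obtain ⟨⟨t2, ht2s, ht2sum⟩, hle2⟩ := ih (j - a) hl' (by omega)
      rcases max_cases (pvBest l j) (pvBest l (j - a) + a) with ⟨hmax, _⟩ | ⟨hmax, _⟩
      · exact ⟨⟨t1, ht1s.cons _, by omega⟩, by omega⟩
      · refine ⟨⟨a :: t2, ht2s.cons₂ _, ?_⟩, by omega⟩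
        simp [ht2sum]; omega
theorem pvBest_optimal (l : List Int) (j : Int) (hl : ∀ a ∈ l, 0 ≤ a) :
    ∀ t : List Int, t.Sublist l → t.sum ≤ j → t.sum ≤ pvBest l j := by
  induction l generalizing j with
  | nil => intro t ht hle; simp [List.sublist_nil.mp ht, pvBest]
  | cons a l ih =>
    intro t ht hle
    have ha : 0 ≤ a := hl a (by simp)
    have hl' : ∀ b ∈ l, 0 ≤ b := fun b hb => hl b (by simp [hb])
    simp only [pvBest]
    rcases List.sublist_cons_iff.mp ht with htl | ⟨t', rfl, ht'⟩
    · split_ifs with hja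
      · exact ih j hl' t htl hle
      · exact le_max_of_le_left (ih j hl' t htl hle)
    · have hsum : (a :: t').sum = a + t'.sum := by simp
      have ht'nn : 0 ≤ t'.sum := List.sum_nonneg (fun b hb => hl' b (ht'.mem hb))
      have hja : ¬ j < a := by omega
      rw [if_neg hja]
      have := ih (j - a) hl' t' ht' (by omega)
      refine le_max_of_le_right ?_
      omega
theorem pv_mem_step (g a : Int) (r : PySem.Set Int) (x : Int) :
    x ∈ PySem.Set.union r ((r.filter (fun s => decide (s + a ≤ g))).map (fun s => s + a)) ↔
      x ∈ r ∨ ∃ y ∈ r, y + a ≤ g ∧ x = y + a := by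
  rw [PySem.Set.mem_union]
  simp only [List.mem_map, List.mem_filter, decide_eq_true_eq]
  constructor
  · rintro (h | ⟨y, ⟨hy, hle⟩, rfl⟩)
    · exact Or.inl h
    · exact Or.inr ⟨y, hy, hle, rfl⟩
  · rintro (h | ⟨y, hy, hle, rfl⟩)
    · exact Or.inl h
    · exact Or.inr ⟨y, ⟨hy, hle⟩, rfl⟩

theorem pv_mem_reach (g : Int) (l : List Int) (hl : ∀ a ∈ l, 0 ≤ a) (r : PySem.Set Int) (x : Int) :
    x ∈ l.foldl (fun r a =>
        PySem.Set.union r ((r.filter (fun s => decide (s + a ≤ g))).map (fun s => s + a))) r ↔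
      x ∈ r ∨ ∃ y ∈ r, ∃ t : List Int, t.Sublist l ∧ t ≠ [] ∧ x = y + t.sum ∧ x ≤ g := by
  induction l generalizing r with
  | nil =>
    simp only [List.foldl_nil]
    constructor
    · exact Or.inl
    · rintro (h | ⟨y, hy, t, ht, hne, _⟩)
      · exact h
      · exact absurd (List.sublist_nil.mp ht) hne
  | cons a l ih =>
    have ha : 0 ≤ a := hl a (by simp)
    have hl' : ∀ b ∈ l, 0 ≤ b := fun b hb => hl b (by simp [hb])
    rw [List.foldl_cons, ih hl']
    constructor
    · rintro (hstep | ⟨y, hy, t, ht, hne, rfl, hxg⟩)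
      · rcases (pv_mem_step g a r x).mp hstep with h | ⟨y, hy, hle, rfl⟩
        · exact Or.inl h
        · exact Or.inr ⟨y, hy, [a], by simp, by simp, by simp, hle⟩
      · rcases (pv_mem_step g a r y).mp hy with h | ⟨y', hy', hle, rfl⟩
        · exact Or.inr ⟨y, h, t, ht.cons _, hne, rfl, hxg⟩
        · exact Or.inr ⟨y', hy', a :: t, ht.cons₂ _, by simp, by simp; ring, hxg⟩
    · rintro (h | ⟨y, hy, t, ht, hne, rfl, hxg⟩)
      · exact Or.inl ((pv_mem_step g a r x).mpr (Or.inl h))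
      · rcases List.sublist_cons_iff.mp ht with htl | ⟨t', rfl, ht'⟩
        · exact Or.inr ⟨y, (pv_mem_step g a r y).mpr (Or.inl hy), t, htl, hne, rfl, hxg⟩
        · have ht'nn : 0 ≤ t'.sum := List.sum_nonneg (fun b hb => hl' b (ht'.mem hb))
          have hsum : y + (a :: t').sum = y + a + t'.sum := by simp; ring
          have hya : y + a ≤ g := by
            have : y + (a :: t').sum ≤ g := hxg
            simp at this; omega
          have hmem : y + a ∈ PySem.Set.union r ((r.filter (fun s => decide (s + a ≤ g))).map (fun s => s + a)) :=
            (pv_mem_step g a r (y + a)).mpr (Or.inr ⟨y, hy, hya, rfl⟩)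
          by_cases ht'e : t' = []
          · subst ht'e
            exact Or.inl (by simpa using hmem)
          · exact Or.inr ⟨y + a, hmem, t', ht', ht'e, by rw [hsum], hxg⟩

def pvIdealRow (g : Int) (arr : List Int) (i : Nat) : List Int :=
  (List.range (g + 1).toNat).map (fun j => pvBest ((arr.take i).reverse) (Int.ofNat j))

def pvBuildT (g : Int) (arr : List Int) (m : Nat) : List (List Int) :=
  (List.range (arr.length + 1)).map
    (fun i => if i ≤ m then pvIdealRow g arr i else List.replicate (g + 1).toNat 0)

theorem pvIdealRow_length (g : Int) (arr : List Int) (i : Nat) :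
    (pvIdealRow g arr i).length = (g + 1).toNat := by
  simp [pvIdealRow]

theorem pvIdealRow_getElem? (g : Int) (arr : List Int) (i : Nat) (j : Nat)
    (hj : j < (g + 1).toNat) :
    (pvIdealRow g arr i)[j]? = some (pvBest ((arr.take i).reverse) (j : Int)) := by
  unfold pvIdealRow
  rw [List.getElem?_map, List.getElem?_range hj]
  rfl

theorem pvIdealRow_zero (g : Int) (arr : List Int) :
    pvIdealRow g arr 0 = List.replicate (g + 1).toNat 0 := by
  apply List.ext_getElem?
  intro j
  by_cases hj : j < (g + 1).toNat
  · rw [pvIdealRow_getElem? g arr 0 j hj, List.getElem?_replicate_of_lt hj]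
    simp [pvBest]
  · rw [List.getElem?_eq_none (by rw [pvIdealRow_length]; omega),
      List.getElem?_eq_none (by simp; omega)]
theorem pvBuildT_length (g : Int) (arr : List Int) (m : Nat) :
    (pvBuildT g arr m).length = arr.length + 1 := by
  simp [pvBuildT]

theorem pvBuildT_getElem? (g : Int) (arr : List Int) (m i : Nat) (hi : i < arr.length + 1) :
    (pvBuildT g arr m)[i]? = some (if i ≤ m then pvIdealRow g arr i else List.replicate (g + 1).toNat 0) := by
  unfold pvBuildT
  rw [List.getElem?_map, List.getElem?_range hi]
  rfl

theorem pvGet2_buildT (g : Int) (arr : List Int) (hg : 0 ≤ g) (m i : Nat) (him : i ≤ m)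
    (hin : i ≤ arr.length) (j : Int) (hj0 : 0 ≤ j) (hjg : j ≤ g) :
    pvGet2 (pvBuildT g arr m) (i : Int) j = pvBest ((arr.take i).reverse) j := by
  rw [pvGet2, PySem.List.pyGet?_natCast, pvBuildT_getElem? g arr m i (by omega), if_pos him,
    Option.bind_some, PySem.List.pyGet?_of_nonneg _ hj0,
    pvIdealRow_getElem? g arr i j.toNat (by omega)]
  simp [Int.toNat_of_nonneg hj0]

theorem pv_outer (g : Int) (arr : List Int) (hg : 0 ≤ g) (hnn : ∀ a ∈ arr, 0 ≤ a)
    (m : Nat) (hm : m ≤ arr.length) :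
    (PySem.List.pyRange 1 ((m : Int) + 1) 1).foldl (fun t i => pvInner g arr i t)
        (pvBuildT g arr 0)
      = pvBuildT g arr m := by
  induction m with
  | zero => simp
  | succ m ih =>
    have hm' : m ≤ arr.length := by omega
    have hmlt : m < arr.length := by omega
    rw [show ((m + 1 : Nat) : Int) + 1 = ((m : Int) + 1) + 1 by push_cast; ring,
      PySem.List.pyRange_one_succ_right (by omega), List.foldl_append, ih hm']
    simp only [List.foldl_cons, List.foldl_nil]
    rw [show ((m : Int) + 1) = ((m + 1 : Nat) : Int) by push_cast; ring]
    rw [pv_inner_eq g arr hg _ (m + 1) (by omega) (by rw [pvBuildT_length]; omega)]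
    have harr : ((m + 1 : Nat) : Int) - 1 = ((m : Nat) : Int) := by push_cast; ring
    have hA : (PySem.List.pyGet? arr (((m : Nat)) : Int)).getD 0 = arr[m] := by
      rw [PySem.List.pyGet?_natCast, List.getElem?_eq_getElem hmlt]
      rfl
    have hz : (pvBuildT g arr m).getD (m + 1) [] = List.replicate (g + 1).toNat 0 := by
      rw [List.getD, List.getElem?_eq_getElem (by rw [pvBuildT_length]; omega)]
      have := pvBuildT_getElem? g arr m (m + 1) (by omega)
      rw [List.getElem?_eq_getElem (by rw [pvBuildT_length]; omega)] at this
      rw [Option.some_inj.mp this, if_neg (by omega)]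
      rfl
    have htake : (arr.take (m + 1)).reverse = arr[m] :: (arr.take m).reverse := by
      rw [List.take_succ_eq_append_getElem hmlt, List.reverse_append]
      rfl
    have hGg : (g + 1).toNat = g.toNat + 1 := by omega
    apply List.ext_getElem?
    intro i'
    by_cases hi' : i' < arr.length + 1
    · by_cases hieq : i' = m + 1
      · subst hieq
        rw [List.getElem?_set_self (by rw [pvBuildT_length]; omega),
          pvBuildT_getElem? g arr (m + 1) (m + 1) hi', if_pos (le_refl _)]
        congr 1
        apply List.ext_getElem?
        intro j
        rw [harr, hA, hz]
        by_cases hj : j < (g + 1).toNat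
        · rw [pvIdealRow_getElem? g arr (m + 1) j hj, pvRowF_getElem?]
          by_cases hj1 : 1 ≤ j
          · rw [if_pos ⟨hj1, by omega, by simpa using hj⟩]
            have hj0 : (0:Int) ≤ (j:Int) := by omega
            have hjg : ((j:Int)) ≤ g := by omega
            rw [htake]
            simp only [pvBest]
            have h1 := pvGet2_buildT g arr hg m m (le_refl m) hm' (j : Int) hj0 hjg
            split_ifs with hc
            · rw [h1]
            · rw [h1, pvGet2_buildT g arr hg m m (le_refl m) hm' ((j:Int) - arr[m])
                (by have h0 := hnn arr[m] (by simp); omega)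
                (by have h0 := hnn arr[m] (by simp); omega)]
          · have hj0 : j = 0 := by omega
            subst hj0
            rw [if_neg (by omega), List.getElem?_replicate_of_lt hj]
            have : pvBest ((arr.take (m + 1)).reverse) 0 = 0 := by
              apply pvBest_zero
              intro a ha
              exact hnn a (List.mem_of_mem_take (List.mem_reverse.mp ha))
            simp [this]
        · rw [List.getElem?_eq_none (by rw [pvRowF_length]; simp; omega),
            List.getElem?_eq_none (by rw [pvIdealRow_length]; omega)]
      · rw [List.getElem?_set_ne (by omega), pvBuildT_getElem? g arr m i' hi',
          pvBuildT_getElem? g arr (m + 1) i' hi']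
        by_cases hile : i' ≤ m
        · rw [if_pos hile, if_pos (by omega)]
        · rw [if_neg hile, if_neg (by omega)]
    · rw [List.getElem?_eq_none (by rw [List.length_set, pvBuildT_length]; omega),
        List.getElem?_eq_none (by rw [pvBuildT_length]; omega)]

theorem pvBuildT_zero (g : Int) (arr : List Int) :
    pvBuildT g arr 0 = List.replicate (arr.length + 1) (List.replicate (g + 1).toNat 0) := by
  apply List.ext_getElem?
  intro i
  by_cases hi : i < arr.length + 1
  · rw [pvBuildT_getElem? g arr 0 i hi, List.getElem?_replicate_of_lt hi]
    by_cases h0 : i = 0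
    · subst h0; rw [if_pos (le_refl _), pvIdealRow_zero]
    · rw [if_neg (by omega)]
  · rw [List.getElem?_eq_none (by rw [pvBuildT_length]; omega),
      List.getElem?_eq_none (by simp; omega)]

theorem pv_table_final (g : Int) (arr : List Int) (hg : 0 ≤ g) (hnn : ∀ a ∈ arr, 0 ≤ a) :
    pvGet2 ((PySem.List.pyRange 1 ((arr.length : Int) + 1) 1).foldl (fun t i => pvInner g arr i t)
        ((PySem.List.pyRange 0 ((arr.length : Int) + 1) 1).map
          (fun _ => List.replicate (g + 1).toNat 0)))
      (arr.length : Int) g = pvBest arr.reverse g := by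
  have hinit : (PySem.List.pyRange 0 ((arr.length : Int) + 1) 1).map
      (fun _ => List.replicate (g + 1).toNat 0) = pvBuildT g arr 0 := by
    rw [List.map_const', PySem.List.length_pyRange_one, pvBuildT_zero,
      show (((arr.length : Int) + 1) - 0).toNat = arr.length + 1 by omega]
  rw [hinit, pv_outer g arr hg hnn arr.length (le_refl _),
    pvGet2_buildT g arr hg arr.length arr.length (le_refl _) (le_refl _) g hg (le_refl _),
    List.take_length]

theorem indianJob_eq_alt (g : Int) (arr : List Int) (h : Pre_indianJob g arr) :
    indianJob g arr = indianJob_alt g arr := by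
  obtain ⟨hne, hd⟩ := h
  rcases eq_or_ne arr [] with rfl | hNE
  · have hg : g < 0 := hne.resolve_left (by simp)
    simp only [indianJob, indianJob_alt, List.sum_nil]
    rw [if_pos (by omega), if_pos (by omega)]
  · simp only [indianJob, indianJob_alt]
    by_cases htot : arr.sum > 2 * g
    · rw [if_pos htot, if_pos htot]
    · rw [if_neg htot, if_neg htot]
      have hnn : ∀ a ∈ arr, 0 ≤ a := hd.resolve_right htot
      have htot0 : 0 ≤ arr.sum := List.sum_nonneg hnn
      have hg : 0 ≤ g := by omega
      obtain ⟨mA, hmA⟩ : ∃ m, PySem.List.max? arr (fun x => x) = some m := by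
        cases hmax : PySem.List.max? arr (fun x => x) with
        | none => exact absurd ((PySem.List.max?_eq_none_iff _ _).mp hmax) hNE
        | some m => exact ⟨m, rfl⟩
      have hmA_mem : mA ∈ arr := PySem.List.max?_mem hmA
      have hrev : ∀ b ∈ arr.reverse, 0 ≤ b := fun b hb => hnn b (List.mem_reverse.mp hb)
      have hM0 : 0 ≤ pvBest arr.reverse g :=
        pvBest_optimal arr.reverse g hrev [] (List.nil_sublist _) (by simpa using hg)
      rw [hmA]
      simp only [Option.getD_some]
      by_cases hfit : arr.sum ≤ g
      · rw [if_pos hfit]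
        have hmAle : mA ≤ arr.sum := List.single_le_sum hnn mA hmA_mem
        rw [if_neg (by omega : ¬ mA > g), pv_table_final g arr hg hnn, if_pos (by omega)]
      · rw [if_neg hfit]
        have hmem : ∀ x : Int, (x ∈ arr.foldl (fun r a =>
            PySem.Set.union r ((r.filter (fun s => decide (s + a ≤ g))).map (fun s => s + a)))
              (PySem.Set.ofList [0])) ↔
            (∃ t : List Int, t.Sublist arr ∧ t.sum = x) ∧ x ≤ g := by
          intro x
          rw [pv_mem_reach g arr hnn (PySem.Set.ofList [0]) x]
          have h0 : ∀ y : Int, y ∈ PySem.Set.ofList [(0:Int)] ↔ y = 0 := by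
            intro y; rw [PySem.Set.mem_ofList]; simp
          constructor
          · rintro (hx | ⟨y, hy, t, ht, _, rfl, hxg⟩)
            · have hx0 : x = 0 := (h0 x).mp hx
              subst hx0
              exact ⟨⟨[], List.nil_sublist _, rfl⟩, hg⟩
            · have hy0 : y = 0 := (h0 y).mp hy
              subst hy0
              exact ⟨⟨t, ht, by omega⟩, hxg⟩
          · rintro ⟨⟨t, ht, rfl⟩, hxg⟩
            by_cases hte : t = []
            · subst hte
              exact Or.inl ((h0 _).mpr (by simp))
            · exact Or.inr ⟨0, (h0 0).mpr rfl, t, ht, hte, by omega, hxg⟩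
        have h0reach := (hmem 0).mpr ⟨⟨[], List.nil_sublist _, rfl⟩, hg⟩
        obtain ⟨mB, hmB⟩ : ∃ m, PySem.List.max? (arr.foldl (fun r a =>
            PySem.Set.union r ((r.filter (fun s => decide (s + a ≤ g))).map (fun s => s + a)))
              (PySem.Set.ofList [0])) (fun x => x) = some m := by
          cases hmax : PySem.List.max? (arr.foldl (fun r a =>
              PySem.Set.union r ((r.filter (fun s => decide (s + a ≤ g))).map (fun s => s + a)))
                (PySem.Set.ofList [0])) (fun x => x) with
          | none => rw [(PySem.List.max?_eq_none_iff _ _).mp hmax] at h0reach; simp at h0reach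
          | some m => exact ⟨m, rfl⟩
        have hmB_mem := PySem.List.max?_mem hmB
        have hmB_max := PySem.List.max?_isMax hmB
        obtain ⟨⟨tb, htb, htbsum⟩, hmBg⟩ := (hmem mB).mp hmB_mem
        rw [hmB]
        simp only [Option.getD_some]
        by_cases hbig : mA > g
        · rw [if_pos hbig, if_pos hbig]
        · rw [if_neg hbig, if_neg hbig]
          rw [pv_table_final g arr hg hnn]
          obtain ⟨⟨tA, htA, htAsum⟩, hMg⟩ := pvBest_achieved arr.reverse g hrev hg
          have hMle : pvBest arr.reverse g ≤ mB := by
            apply hmB_max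
            apply (hmem _).mpr
            exact ⟨⟨tA.reverse, List.sublist_reverse_iff.mp htA,
              by rw [List.sum_reverse]; exact htAsum⟩, hMg⟩
          have hBle : mB ≤ pvBest arr.reverse g := by
            have := pvBest_optimal arr.reverse g hrev tb.reverse htb.reverse
              (by rw [List.sum_reverse]; omega)
            rw [List.sum_reverse, htbsum] at this
            exact this
          rw [le_antisymm hMle hBle]
          rfl

-- ===== VERDICT (by name: the statement is the Claim_ definition above) =====
theorem indianJob_spec : Claim_equal_indianJob := by
  intro g arr _ hpre
  unfold Spec_indianJob
  exact indianJob_eq_alt g arr hpre
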